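-- pv_equiv track=rewrite | github.com/nobodyknowwhy/distance_analysis | leetcode/7424436653624328236.py | solution
-- ===== SOURCE A (Python) =====
-- def solution(values: list) -> int:
--
--     len_val = len(values)
--
--     max_val = -1
--
--     for i in range(0, len_val):
--         for j in range(i, len_val):
--             if i == j:
--                 tmp_val = values[i]
--             else:
--                 tmp_val = values[i] + values[j] + i - j
--
--             max_val = max(max_val, tmp_val)
--
--     return max_val
-- ===== SOURCE B (Python) =====
-- def solution(values: list) -> int:
--     max_val = -1
--     best = None  # running max of values[i] + i over indices seen so far
--     for j, v in enumerate(values):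
--         if v > max_val:
--             max_val = v
--         if best is not None and best + v - j > max_val:
--             max_val = best + v - j
--         if best is None or v + j > best:
--             best = v + j
--     return max_val
-- ===== Notes on version B (the rewrite author's own statement) =====
-- stated objective: faster
-- what changed: Replaced the nested scan over all pairs i<=j with a single pass that keeps the running maximum of values[i]+i (and checks the diagonal separately), turning O(n^2) into O(n).
import Mathlib
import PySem

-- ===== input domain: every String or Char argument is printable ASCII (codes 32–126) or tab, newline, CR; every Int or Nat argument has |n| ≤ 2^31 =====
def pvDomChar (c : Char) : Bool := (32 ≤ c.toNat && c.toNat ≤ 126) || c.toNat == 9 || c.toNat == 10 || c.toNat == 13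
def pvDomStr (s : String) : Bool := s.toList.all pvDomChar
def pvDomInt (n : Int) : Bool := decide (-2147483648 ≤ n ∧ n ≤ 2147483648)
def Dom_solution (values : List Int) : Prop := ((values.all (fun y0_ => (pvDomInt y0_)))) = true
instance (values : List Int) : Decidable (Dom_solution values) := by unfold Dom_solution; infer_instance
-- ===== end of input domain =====

-- B replaces A's quadratic scan over all pairs i ≤ j by a single pass keeping the running
-- maximum of values[i] + i; the return values are proved equal on every input.

-- ===== PORT A =====
def solution (values : List Int) : Int :=
  let len_val : Int := values.length
  (PySem.List.pyRange 0 len_val 1).foldl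
    (fun max_val i =>
      (PySem.List.pyRange i len_val 1).foldl
        (fun max_val j =>
          let tmp_val :=
            if i == j then PySem.List.pyGetD values i 0
            else PySem.List.pyGetD values i 0 + PySem.List.pyGetD values j 0 + i - j
          max max_val tmp_val)
        max_val)
    (-1)

-- ===== PORT B =====
def solution_alt (values : List Int) : Int :=
  ((PySem.List.enumerate values 0).foldl
    (fun (st : Int × Option Int) jv =>
      let max_val := st.1
      let best := st.2
      let j := jv.1
      let v := jv.2
      let max_val := if v > max_val then v else max_val
      let max_val :=
        match best with
        | some b => if b + v - j > max_val then b + v - j else max_val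
        | none => max_val
      let best :=
        match best with
        | none => some (v + j)
        | some b => if v + j > b then some (v + j) else some b
      (max_val, best))
    (-1, none)).1

-- ===== PRECONDITION & SPEC =====
def Spec_solution (values : List Int) (out : Int) : Prop := out = solution_alt values
instance (values : List Int) (out : Int) : Decidable (Spec_solution values out) := by unfold Spec_solution; infer_instance

-- ===== CLAIM (what is proved, stated in full; the proofs are below) =====
def Claim_equal_solution : Prop := ∀ (values : List Int), Dom_solution values → Spec_solution values (solution values)

-- ===== LEMMAS AND PROOFS =====
-- proof helpers: a running-max fold and its algebra
def Hmax (h : Int → Int) (a : Int) (l : List Int) : Int :=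
  l.foldl (fun acc i => max acc (h i)) a

theorem Hmax_nil (h : Int → Int) (a : Int) : Hmax h a [] = a := rfl
theorem Hmax_cons (h : Int → Int) (a i : Int) (l : List Int) :
    Hmax h a (i :: l) = Hmax h (max a (h i)) l := rfl

theorem Hmax_max_left (h : Int → Int) (l : List Int) (a b : Int) :
    Hmax h (max a b) l = max a (Hmax h b l) := by
  induction l generalizing b with
  | nil => rfl
  | cons i t ih => simp only [Hmax_cons, max_assoc]; exact ih _

theorem le_Hmax (h : Int → Int) (a : Int) (l : List Int) : a ≤ Hmax h a l :=
  (PySem.List.le_foldl_max_int l h a).1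

theorem Hmax_append_singleton (h : Int → Int) (a x : Int) (l : List Int) :
    Hmax h a (l ++ [x]) = max (Hmax h a l) (h x) := by
  simp [Hmax, List.foldl_append]

theorem Hmax_congr (p q : Int → Int) (a : Int) (l : List Int)
    (hpq : ∀ i ∈ l, p i = q i) : Hmax p a l = Hmax q a l := by
  induction l generalizing a with
  | nil => rfl
  | cons i t ih =>
    simp only [Hmax_cons, hpq i (by simp)]
    exact ih _ (fun j hj => hpq j (by simp [hj]))

theorem Hmax_split (p q : Int → Int) (a : Int) (l : List Int) :
    Hmax (fun i => max (p i) (q i)) a l = max (Hmax p a l) (Hmax q a l) := by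
  induction l generalizing a with
  | nil => simp [Hmax_nil]
  | cons i t ih =>
    simp only [Hmax_cons]
    rw [ih]
    have h1 : max a (max (p i) (q i)) = max (q i) (max a (p i)) := by omega
    have h2 : max a (max (p i) (q i)) = max (p i) (max a (q i)) := by omega
    have hp := le_Hmax p (max a (p i)) t
    have hq := le_Hmax q (max a (q i)) t
    rw [show (Hmax p (max a (max (p i) (q i))) t) = max (q i) (Hmax p (max a (p i)) t) by
          rw [h1, Hmax_max_left],
        show (Hmax q (max a (max (p i) (q i))) t) = max (p i) (Hmax q (max a (q i)) t) by
          rw [h2, Hmax_max_left]]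
    omega

theorem Hmax_add_const (h : Int → Int) (c : Int) (a : Int) (l : List Int) :
    Hmax (fun i => h i + c) a l = Hmax h (a - c) l + c := by
  induction l generalizing a with
  | nil => simp [Hmax_nil]
  | cons i t ih =>
    simp only [Hmax_cons]
    rw [ih]
    congr 2
    omega

theorem pyGetD_append_left (vs : List Int) (x : Int) (i : Int) (h0 : 0 ≤ i) (h1 : i < (vs.length : Int)) :
    PySem.List.pyGetD (vs ++ [x]) i 0 = PySem.List.pyGetD vs i 0 := by
  rw [PySem.List.pyGetD_eq_getElem (vs ++ [x]) 0 h0 (by simp; omega),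
      PySem.List.pyGetD_eq_getElem vs 0 h0 h1]
  exact List.getElem_append_left (by omega)

theorem pyGetD_append_last (vs : List Int) (x : Int) :
    PySem.List.pyGetD (vs ++ [x]) (vs.length : Int) 0 = x := by
  rw [PySem.List.pyGetD_eq_getElem (vs ++ [x]) 0 (by positivity) (by simp)]
  simp

theorem enumerate_append_singleton (vs : List Int) (x : Int) (s : Int) :
    PySem.List.enumerate (vs ++ [x]) s = PySem.List.enumerate vs s ++ [(s + (vs.length : Int), x)] := by
  induction vs generalizing s with
  | nil => simp [PySem.List.enumerate_nil, PySem.List.enumerate_cons]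
  | cons v t ih =>
    simp only [List.cons_append, PySem.List.enumerate_cons, ih, List.length_cons]
    push_cast
    ring_nf

def tmpf (vs : List Int) (i j : Int) : Int :=
  if i == j then PySem.List.pyGetD vs i 0
  else PySem.List.pyGetD vs i 0 + PySem.List.pyGetD vs j 0 + i - j

def rowC (vs : List Int) (n i : Int) : Int :=
  Hmax (tmpf vs i) (tmpf vs i i) (PySem.List.pyRange (i + 1) n 1)

def bOpt (vs : List Int) : Option Int :=
  (PySem.List.enumerate vs 0).foldl
    (fun o p => match o with
      | none => some (p.2 + p.1)
      | some b => some (max b (p.2 + p.1))) none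

theorem solution_eq_NF (vs : List Int) :
    solution vs = Hmax (rowC vs (vs.length : Int)) (-1) (PySem.List.pyRange 0 (vs.length : Int) 1) := by
  unfold solution Hmax
  apply PySem.List.foldl_congr_mem
  intro acc i hi
  rw [PySem.List.mem_pyRange_one] at hi
  rw [PySem.List.pyRange_one_cons hi.2]
  show Hmax (tmpf vs i) acc (i :: PySem.List.pyRange (i+1) (vs.length : Int) 1) = _
  rw [Hmax_cons, show max acc (tmpf vs i i) = max acc (tmpf vs i i) from rfl, Hmax_max_left]
  rfl

theorem tmpf_append_lt (vs : List Int) (x i j : Int) (h0 : 0 ≤ i) (h1 : i < (vs.length : Int))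
    (h2 : 0 ≤ j) (h3 : j < (vs.length : Int)) :
    tmpf (vs ++ [x]) i j = tmpf vs i j := by
  unfold tmpf
  rw [pyGetD_append_left vs x i h0 h1, pyGetD_append_left vs x j h2 h3]

theorem rowC_snoc_lt (vs : List Int) (x i : Int) (h0 : 0 ≤ i) (h1 : i < (vs.length : Int)) :
    rowC (vs ++ [x]) ((vs.length : Int) + 1) i
      = max (rowC vs (vs.length : Int) i) (PySem.List.pyGetD vs i 0 + x + i - (vs.length : Int)) := by
  unfold rowC
  rw [PySem.List.pyRange_one_succ_right (by omega), Hmax_append_singleton]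
  congr 1
  · rw [tmpf_append_lt vs x i i h0 h1 h0 h1]
    apply Hmax_congr
    intro j hj
    rw [PySem.List.mem_pyRange_one] at hj
    exact tmpf_append_lt vs x i j h0 h1 (by omega) hj.2
  · unfold tmpf
    rw [if_neg (by simp; omega), pyGetD_append_left vs x i h0 h1, pyGetD_append_last]

theorem rowC_snoc_last (vs : List Int) (x : Int) :
    rowC (vs ++ [x]) ((vs.length : Int) + 1) (vs.length : Int) = x := by
  unfold rowC
  rw [PySem.List.pyRange_one_eq_nil (by omega), Hmax_nil]
  unfold tmpf
  rw [if_pos (by simp), pyGetD_append_last]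

theorem bOpt_nil : bOpt [] = none := rfl

theorem bOpt_snoc (vs : List Int) (x : Int) :
    bOpt (vs ++ [x]) = some (match bOpt vs with
      | none => x + (vs.length : Int)
      | some b => max b (x + (vs.length : Int))) := by
  unfold bOpt
  rw [enumerate_append_singleton, List.foldl_append]
  cases h : (PySem.List.enumerate vs 0).foldl
      (fun o p => match o with
        | none => some (p.2 + p.1)
        | some b => some (max b (p.2 + p.1))) none <;> simp

theorem Hmax_vi (vs : List Int) (a : Int) :
    Hmax (fun i => PySem.List.pyGetD vs i 0 + i) a (PySem.List.pyRange 0 (vs.length : Int) 1)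
      = match bOpt vs with | none => a | some b => max a b := by
  induction vs using List.reverseRecOn generalizing a with
  | nil => simp [bOpt_nil, PySem.List.pyRange_one_eq_nil, Hmax_nil]
  | append_singleton t x ih =>
    rw [show ((t ++ [x]).length : Int) = (t.length : Int) + 1 by simp,
        PySem.List.pyRange_one_succ_right (by positivity), Hmax_append_singleton,
        Hmax_congr _ (fun i => PySem.List.pyGetD t i 0 + i) a _
          (by intro i hi; rw [PySem.List.mem_pyRange_one] at hi
              rw [pyGetD_append_left t x i hi.1 hi.2]),
        ih, pyGetD_append_last, bOpt_snoc]
    cases h : bOpt t with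
    | none => rfl
    | some b => simp [max_assoc]

theorem neg_one_le_solution (vs : List Int) : -1 ≤ solution vs := by
  rw [solution_eq_NF]; exact le_Hmax _ _ _

theorem solution_snoc (vs : List Int) (x : Int) :
    solution (vs ++ [x]) = match bOpt vs with
      | none => max (solution vs) x
      | some b => max (max (solution vs) x) (b + x - (vs.length : Int)) := by
  rw [solution_eq_NF (vs ++ [x]),
      show (((vs ++ [x]).length : Int)) = (vs.length : Int) + 1 by simp,
      PySem.List.pyRange_one_succ_right (by positivity), Hmax_append_singleton, rowC_snoc_last,
      Hmax_congr (rowC (vs ++ [x]) ((vs.length : Int) + 1))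
        (fun i => max (rowC vs (vs.length : Int) i)
          ((PySem.List.pyGetD vs i 0 + i) + (x - (vs.length : Int)))) (-1) _
        (by intro i hi
            rw [PySem.List.mem_pyRange_one] at hi
            rw [rowC_snoc_lt vs x i hi.1 hi.2]
            congr 1
            ring),
      Hmax_split, Hmax_add_const, Hmax_vi, ← solution_eq_NF]
  have hle := neg_one_le_solution vs
  cases h : bOpt vs with
  | none =>
    show max (max (solution vs) (-1 - (x - (vs.length : Int)) + (x - (vs.length : Int)))) x
        = max (solution vs) x
    simp only [max_def]
    split_ifs <;> omega
  | some b =>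
    show max (max (solution vs)
          (max (-1 - (x - (vs.length : Int))) b + (x - (vs.length : Int)))) x
        = max (max (solution vs) x) (b + x - (vs.length : Int))
    simp only [max_def]
    split_ifs <;> omega

def stepFn : Int × Option Int → Int × Int → Int × Option Int :=
  fun st jv =>
    let max_val := st.1
    let best := st.2
    let j := jv.1
    let v := jv.2
    let max_val := if v > max_val then v else max_val
    let max_val :=
      match best with
      | some b => if b + v - j > max_val then b + v - j else max_val
      | none => max_val
    let best :=
      match best with
      | none => some (v + j)
      | some b => if v + j > b then some (v + j) else some b
    (max_val, best)

theorem stepFn_none (mv j v : Int) : stepFn (mv, none) (j, v) = (max mv v, some (v + j)) := by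
  show ((if v > mv then v else mv), some (v + j)) = _
  rw [Prod.mk.injEq]
  refine ⟨?_, rfl⟩
  rw [max_def]
  split_ifs <;> omega

theorem stepFn_some (mv b j v : Int) : stepFn (mv, some b) (j, v)
    = (max (max mv v) (b + v - j), some (max b (v + j))) := by
  show ((if b + v - j > (if v > mv then v else mv) then b + v - j else (if v > mv then v else mv)),
        (if v + j > b then some (v + j) else some b)) = _
  rw [Prod.mk.injEq]
  constructor
  · simp only [max_def]
    split_ifs <;> omega
  · have hmx : max b (v + j) = if v + j > b then v + j else b := by
      rw [max_def]; split_ifs <;> omega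
    rw [hmx]
    split_ifs <;> rfl

theorem alt_state (vs : List Int) :
    List.foldl stepFn (-1, none) (PySem.List.enumerate vs 0) = (solution vs, bOpt vs) := by
  induction vs using List.reverseRecOn with
  | nil => decide
  | append_singleton t x ih =>
    rw [enumerate_append_singleton, List.foldl_append, ih]
    cases h : bOpt t with
    | none =>
      rw [List.foldl_cons, List.foldl_nil, stepFn_none, solution_snoc, bOpt_snoc, h]
      simp
    | some b =>
      rw [List.foldl_cons, List.foldl_nil, stepFn_some, solution_snoc, bOpt_snoc, h]
      simp


-- ===== VERDICT (by name: the statement is the Claim_ definition above) =====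
theorem solution_spec : Claim_equal_solution := by
  intro values _
  show solution values = solution_alt values
  calc solution values = (solution values, bOpt values).1 := rfl
    _ = (List.foldl stepFn (-1, none) (PySem.List.enumerate values 0)).1 := by
          rw [alt_state]
    _ = solution_alt values := rfl
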